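-- pv_equiv track=rewrite | github.com/MrBrantCode/unitest_baseline | mut_generate/mist_train_cf/cf_30170/solution.py | smallest_prime_replacement
-- ===== SOURCE A (Python) =====
-- def is_prime(x):
--     if x == 2:
--         return True
--     if x == 1 or x % 2 == 0:
--         return False
--     for i in range(3, int(x**0.5) + 1, 2):
--         if x % i == 0:
--             return False
--     return True
--
-- def smallest_prime_replacement(n):
--     if is_prime(n):
--         return n
--     n_str = str(n)
--     for i in range(len(n_str)):
--         for j in range(10):
--             new_num = int(n_str[:i] + str(j) + n_str[i+1:])
--             if is_prime(new_num):
--                 return new_num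
--     return None  # No prime number found after replacement
-- ===== SOURCE B (Python) =====
-- def smallest_prime_replacement(n):
--     s = str(n)
--     candidates = [n] + [int(s[:i] + d + s[i + 1:])
--                         for i in range(len(s)) for d in "0123456789"]
--     limit = max(candidates)
--     # Sieve of Eratosthenes up to r = isqrt(limit), giving the prime table
--     r = 1
--     while (r + 1) * (r + 1) <= limit:
--         r += 1
--     sieve = [i >= 2 for i in range(r + 1)]
--     for p in range(2, r + 1):
--         for m in range(p * p, r + 1, p):
--             sieve[m] = False
--     primes = [p for p in range(2, r + 1) if sieve[p]]
--     for c in candidates: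
--         if _is_prime_with(c, primes):
--             return c
--     return None
--
--
-- def _is_prime_with(c, primes):
--     if c < 2:
--         return False
--     for p in primes:
--         if p * p > c:
--             break
--         if c % p == 0:
--             return False
--     return True
-- ===== Notes on version B (the rewrite author's own statement) =====
-- stated objective: alternative
-- what changed: B collects all replacement candidates up front, computes their maximum, builds a prime table with a Sieve of Eratosthenes up to isqrt(max) and tests each candidate against that precomputed table, instead of A's per-candidate trial division over all odd numbers up to a float sqrt inside nested early-return loops.
-- outside the precondition, e.g. on smallest_prime_replacement(-2): A returns 2, B returns 2; on smallest_prime_replacement(-3): A raises TypeError, B returns 3; on smallest_prime_replacement(-4): A raises TypeError, B returns None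
import Mathlib
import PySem

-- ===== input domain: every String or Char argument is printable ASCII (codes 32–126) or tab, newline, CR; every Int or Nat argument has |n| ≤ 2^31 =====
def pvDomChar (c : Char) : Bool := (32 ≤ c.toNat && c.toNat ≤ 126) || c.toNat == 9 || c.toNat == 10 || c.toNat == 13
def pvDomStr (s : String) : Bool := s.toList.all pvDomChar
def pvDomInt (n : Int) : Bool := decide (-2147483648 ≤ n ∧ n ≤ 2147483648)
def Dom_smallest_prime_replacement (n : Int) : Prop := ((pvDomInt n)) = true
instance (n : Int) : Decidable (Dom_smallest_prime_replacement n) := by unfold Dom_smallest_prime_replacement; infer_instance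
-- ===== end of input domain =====

-- B re-implements A's digit-replacement search by first collecting all candidates, sieving the
-- primes up to isqrt(max candidate) with a Sieve of Eratosthenes, and testing each candidate
-- against that precomputed prime table (alternative algorithm; return value only, no mutation).


-- ===== PORT A =====
-- int(x**0.5): equals the integer square root on the 0 ≤ x < 2^40 reached inside Pre_
-- (float sqrt of such x truncates to isqrt); negative x raise TypeError and are outside Pre_.
def pvSqrtA (x : Int) : Int := (Nat.sqrt x.toNat : Int)

-- 'for i in range(3, int(x**0.5) + 1, 2): if x % i == 0: return False' / final 'return True'
def pvTrialA (x : Int) : List Int → Bool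
  | [] => true
  | i :: rest => if PySem.Int.mod x i == 0 then false else pvTrialA x rest

def pvIsPrimeA (x : Int) : Bool :=
  if x == 2 then true
  else if x == 1 || PySem.Int.mod x 2 == 0 then false
  else pvTrialA x (PySem.List.pyRange 3 (pvSqrtA x + 1) 2)

-- int(n_str[:i] + str(j) + n_str[i+1:]); inside Pre_ the string is all digits so int()
-- cannot raise and the getD 0 default is unreachable
def pvCandA (s : List Char) (i j : Int) : Int :=
  (PySem.Int.ofChars? (PySem.List.slice s none (some i) ++ PySem.Int.toChars j ++ PySem.List.slice s (some (i+1)) none)).getD 0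

def pvInnerA (s : List Char) (i : Int) : List Int → Option Int
  | [] => none
  | j :: js =>
    let new := pvCandA s i j
    if pvIsPrimeA new then some new else pvInnerA s i js

def pvOuterA (s : List Char) : List Int → Option Int
  | [] => none
  | i :: is =>
    match pvInnerA s i (PySem.List.pyRange 0 10 1) with
    | some v => some v
    | none => pvOuterA s is

def smallest_prime_replacement (n : Int) : Option Int :=
  if pvIsPrimeA n then some n
  else
    let s := PySem.Int.toChars n
    pvOuterA s (PySem.List.pyRange 0 (s.length : Int) 1)

-- ===== PORT B =====
-- int(s[:i] + d + s[i+1:]) for a single digit character d; inside Pre_ the spliced string is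
-- all digits, so int() cannot raise and the getD 0 default is unreachable
def pvCandB (s : List Char) (i : Int) (d : Char) : Int :=
  (PySem.Int.ofChars? (PySem.List.slice s none (some i) ++ [d] ++ PySem.List.slice s (some (i+1)) none)).getD 0

-- the comprehension [int(s[:i]+d+s[i+1:]) for i in range(len(s)) for d in "0123456789"]
def pvCandsB (s : List Char) : List Int :=
  (PySem.List.pyRange 0 (s.length : Int) 1).flatMap fun i =>
    ['0','1','2','3','4','5','6','7','8','9'].map (pvCandB s i)

-- 'r = 1; while (r+1)*(r+1) <= limit: r += 1'
def pvSqrtLoop (limit r : Int) : Int :=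
  if h : (r + 1) * (r + 1) ≤ limit then pvSqrtLoop limit (r + 1) else r
termination_by (limit - r).toNat
decreasing_by
  have h0 : (0:Int) ≤ (r+1)*(r+1) := mul_self_nonneg _
  by_cases hr : 0 ≤ r
  · have : r + 1 ≤ (r+1)*(r+1) := le_mul_of_one_le_left (by omega) (by omega)
    omega
  · omega

-- the mutable Python list sieve is an Array Bool; inner 'for m in range(p*p, r+1, p):
-- sieve[m] = False': every m in the range has 0 ≤ m ≤ r < len(sieve), so Python's in-range
-- item assignment is exactly setIfInBounds m.toNat (the out-of-bounds case is unreachable)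
def pvMark (r p : Int) (sv : Array Bool) : Array Bool :=
  (PySem.List.pyRange (p * p) (r + 1) p).foldl (fun sv m => sv.setIfInBounds m.toNat false) sv

-- 'sieve = [i >= 2 for i in range(r+1)]' then 'for p in range(2, r+1): <mark multiples>'
def pvSieve (r : Int) : Array Bool :=
  (PySem.List.pyRange 2 (r + 1) 1).foldl (fun sv p => pvMark r p sv)
    ((PySem.List.pyRange 0 (r + 1) 1).map (fun i => decide (2 ≤ i))).toArray

-- 'primes = [p for p in range(2, r+1) if sieve[p]]'; 2 ≤ p ≤ r < len(sieve), so Python's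
-- sieve[p] is exactly Array.getD p.toNat (default unreachable)
def pvPrimes (r : Int) (sv : Array Bool) : List Int :=
  (PySem.List.pyRange 2 (r + 1) 1).filter (fun p => sv.getD p.toNat false)

-- the 'for p in primes: if p*p > c: break; if c % p == 0: return False' loop of _is_prime_with
def pvCheckLoop (c : Int) : List Int → Bool
  | [] => true
  | p :: ps => if p * p > c then true else if PySem.Int.mod c p == 0 then false else pvCheckLoop c ps

def pvIsPrimeWith (c : Int) (primes : List Int) : Bool :=
  if c < 2 then false else pvCheckLoop c primes

-- final 'for c in candidates: if _is_prime_with(c, primes): return c' / 'return None'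
def pvScanB (primes : List Int) : List Int → Option Int
  | [] => none
  | c :: cs => if pvIsPrimeWith c primes then some c else pvScanB primes cs

def smallest_prime_replacement_alt (n : Int) : Option Int :=
  let s := PySem.Int.toChars n
  let cands := n :: pvCandsB s
  -- max(candidates): the list is nonempty ([n] is its head), so max? is some and getD 0 unreachable
  let limit := (PySem.List.max? cands (fun x => x)).getD 0
  let r := pvSqrtLoop limit 1
  pvScanB (pvPrimes r (pvSieve r)) cands

-- ===== PRECONDITION & SPEC =====
-- Pre_ excludes negative n: there A's is_prime reaches (x**0.5) of a negative odd value and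
-- raises TypeError before the scan can finish (only for a few negative even n such as -2 is a
-- prime candidate found first and returned — B returns the same value on those).
def Pre_smallest_prime_replacement (n : Int) : Prop := 0 ≤ n
instance (n : Int) : Decidable (Pre_smallest_prime_replacement n) := by unfold Pre_smallest_prime_replacement; infer_instance
def pvWitness_smallest_prime_replacement : Int := 10

def Spec_smallest_prime_replacement (n : Int) (out : Option Int) : Prop := out = smallest_prime_replacement_alt n
instance (n : Int) (out : Option Int) : Decidable (Spec_smallest_prime_replacement n out) := by unfold Spec_smallest_prime_replacement; infer_instance

-- ===== CLAIM (what is proved, stated in full; the proofs are below) =====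
def Claim_equal_smallest_prime_replacement : Prop := ∀ (n : Int), Dom_smallest_prime_replacement n → Pre_smallest_prime_replacement n → Spec_smallest_prime_replacement n (smallest_prime_replacement n)

-- ===== LEMMAS AND PROOFS =====

-- ---- str(n) for n ≥ 0 consists of digit characters, never '-' ----
lemma pvDigitCharNeDash (k : Nat) : Nat.digitChar k ≠ '-' := by
  by_cases h : k < 16
  · interval_cases k <;> decide
  · have h16 : Nat.digitChar k = '*' := by
      unfold Nat.digitChar
      repeat rw [if_neg (by omega)]
    rw [h16]; decide

lemma pvToDigitsCoreNeDash (b : Nat) : ∀ (fuel n : Nat) (acc : List Char),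
    (∀ c ∈ acc, c ≠ '-') → ∀ c ∈ Nat.toDigitsCore b fuel n acc, c ≠ '-' := by
  intro fuel
  induction fuel with
  | zero => intro n acc hacc c hc; exact hacc c (by simpa [Nat.toDigitsCore] using hc)
  | succ fuel ih =>
    intro n acc hacc c hc
    rw [Nat.toDigitsCore] at hc
    by_cases h0 : n / b = 0
    · simp only [h0] at hc
      rcases List.mem_cons.mp hc with h | h
      · exact h ▸ pvDigitCharNeDash _
      · exact hacc c h
    · simp only [if_neg h0] at hc
      exact ih (n / b) _ (by
        intro c' hc'
        rcases List.mem_cons.mp hc' with h | h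
        · exact h ▸ pvDigitCharNeDash _
        · exact hacc c' h) c hc

lemma pvToCharsNeDash (n : Int) (hn : 0 ≤ n) : ∀ c ∈ PySem.Int.toChars n, c ≠ '-' := by
  intro c hc
  rw [PySem.Int.toChars, if_neg (by omega)] at hc
  exact pvToDigitsCoreNeDash 10 _ _ [] (by simp) c hc

-- ---- the value int() returns on a string without '-' is nonnegative ----
lemma pvOptNonneg (o : Option Nat) :
    0 ≤ (Option.map (fun (a : Int) => a) (o.bind fun a => some ((a : Nat) : Int))).getD 0 := by
  cases o <;> simp

lemma pvOfCharsNonneg (l : List Char) (h : ∀ c ∈ l, c ≠ '-') :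
    0 ≤ (PySem.Int.ofChars? l).getD 0 := by
  rw [PySem.Int.ofChars?]
  split
  · rename_i ds heq
    exfalso
    have hm : '-' ∈ (((l.dropWhile PySem.Int.isIntSpace).reverse.dropWhile PySem.Int.isIntSpace).reverse) := by
      rw [heq]; exact List.mem_cons_self
    have : '-' ∈ l := by
      have h1 := (List.dropWhile_sublist (p := PySem.Int.isIntSpace) (l := (l.dropWhile PySem.Int.isIntSpace).reverse)).mem (List.mem_reverse.mp hm)
      exact (List.dropWhile_sublist _).mem (List.mem_reverse.mp h1)
    exact h '-' this rfl
  · apply pvOptNonneg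
  · apply pvOptNonneg

-- ---- A's trial-division loop as a quantifier ----
lemma pvTrialA_iff (x : Int) (l : List Int) :
    pvTrialA x l = true ↔ ∀ i ∈ l, ¬ PySem.Int.mod x i = 0 := by
  induction l with
  | nil => simp [pvTrialA]
  | cons i rest ih => by_cases h : PySem.Int.mod x i = 0 <;> simp [pvTrialA, h, ih]

-- ---- A's primality test decides Nat.Prime ----
lemma pvPrimeA_iff (m : Nat) : (pvIsPrimeA (m : Int) = true ↔ m.Prime) := by
  rw [pvIsPrimeA]
  by_cases h2 : (m : Int) = 2
  · have : m = 2 := by omega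
    subst this
    simp [Nat.prime_two]
  rw [if_neg (by simpa using h2)]
  by_cases hm2 : m = 2
  · exact absurd (by exact_mod_cast hm2) h2
  by_cases h1 : m = 1
  · subst h1; simp [Nat.not_prime_one]
  by_cases heven : 2 ∣ m
  · have : PySem.Int.mod (m : Int) 2 = 0 := by
      rw [PySem.Int.mod_eq_zero_iff_dvd]; exact_mod_cast heven
    rw [if_pos (by rw [this]; simp)]
    simp only [Bool.false_eq_true, false_iff]
    intro hp
    rcases (Nat.Prime.eq_one_or_self_of_dvd hp 2 heven) with h | h <;> omega
  · have hmod : PySem.Int.mod (m : Int) 2 ≠ 0 := by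
      rw [Ne, PySem.Int.mod_eq_zero_iff_dvd]
      exact fun hd => heven (by exact_mod_cast hd)
    rw [if_neg (by simp [h1]; omega)]
    have hmodd : ¬ 2 ∣ m := heven
    have hm3 : 3 ≤ m := by
      rcases Nat.lt_or_ge m 3 with h | h
      · interval_cases m <;> simp_all
      · exact h
    rw [pvTrialA_iff]
    constructor
    · intro hno
      rw [Nat.prime_def_le_sqrt]
      refine ⟨by omega, ?_⟩
      intro k hk2 hksqrt hkdvd
      by_cases hke : 2 ∣ k
      · exact hmodd (dvd_trans hke hkdvd)
      · have hk3 : 3 ≤ k := by omega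
        have hkmem : (k : Int) ∈ PySem.List.pyRange 3 (pvSqrtA (m : Int) + 1) 2 := by
          rw [PySem.List.mem_pyRange_iff_of_pos (by norm_num)]
          refine ⟨by exact_mod_cast hk3, ?_, ?_⟩
          · have : k ≤ Nat.sqrt m := hksqrt
            simp only [pvSqrtA, Int.toNat_natCast]
            omega
          · omega
        have := hno _ hkmem
        rw [PySem.Int.mod_eq_zero_iff_dvd] at this
        exact this (by exact_mod_cast hkdvd)
    · intro hp i hi hîmp
      rw [PySem.List.mem_pyRange_iff_of_pos (by norm_num)] at hi
      obtain ⟨hi3, hiub, _⟩ := hi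
      rw [PySem.Int.mod_eq_zero_iff_dvd] at hîmp
      have hidvd : i.toNat ∣ m := by
        have : ((i.toNat : Nat) : Int) ∣ (m : Int) := by
          rwa [Int.toNat_of_nonneg (by omega)]
        exact_mod_cast this
      rcases (Nat.Prime.eq_one_or_self_of_dvd hp _ hidvd) with h | h
      · omega
      · have hsq : Nat.sqrt m < m := Nat.sqrt_lt_self (by omega)
        simp only [pvSqrtA, Int.toNat_natCast] at hiub
        omega

lemma pvNatDvdOfIntDvd (m : Nat) (i : Int) (hi : 0 ≤ i) (h : i ∣ (m : Int)) : i.toNat ∣ m := by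
  have : ((i.toNat : Nat) : Int) ∣ (m : Int) := by rwa [Int.toNat_of_nonneg hi]
  exact_mod_cast this

-- ---- the while-loop integer sqrt: its result bounds limit ----
lemma pvSqrtLoop_bounds (limit : Int) : ∀ (r : Int), 1 ≤ r →
    r ≤ pvSqrtLoop limit r ∧ limit < (pvSqrtLoop limit r + 1) * (pvSqrtLoop limit r + 1) := by
  intro r
  induction hk : (limit - r).toNat using Nat.strong_induction_on generalizing r with
  | _ k ih =>
  intro hr
  rw [pvSqrtLoop]
  by_cases h : (r + 1) * (r + 1) ≤ limit
  · rw [dif_pos h]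
    have hstep : r + 1 ≤ (r+1)*(r+1) := le_mul_of_one_le_left (by omega) (by omega)
    have := ih (limit - (r+1)).toNat (by omega) (r+1) rfl (by omega)
    omega
  · rw [dif_neg h]
    omega

-- ---- getD after one List.set ----
lemma pvGetD_set (sv : List Bool) (i k : Nat) (v : Bool) (hi : i < sv.length) :
    (sv.set i v).getD k false = if i = k then v else sv.getD k false := by
  rw [List.getD_eq_getElem?_getD, List.getD_eq_getElem?_getD, List.getElem?_set]
  by_cases h : i = k
  · subst h; simp [hi]
  · simp [h]

-- ---- getD after the marking fold ----
lemma pvFoldlSet_getD (l : List Int) (sv : List Bool) (k : Nat)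
    (hl : ∀ m ∈ l, m.toNat < sv.length) :
    (l.foldl (fun s m => s.set m.toNat false) sv).getD k false
      = (sv.getD k false && !decide (∃ m ∈ l, m.toNat = k)) := by
  induction l generalizing sv with
  | nil => simp
  | cons m l ihl =>
    simp only [List.foldl_cons]
    rw [ihl _ (by intro x hx; rw [List.length_set]; exact hl x (List.mem_cons_of_mem _ hx))]
    rw [pvGetD_set sv m.toNat k false (hl m List.mem_cons_self)]
    by_cases h : m.toNat = k
    · simp [h]
    · simp [h]

-- list models of the array sieve, used only by the proofs
def pvMarkL (r p : Int) (sv : List Bool) : List Bool :=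
  (PySem.List.pyRange (p * p) (r + 1) p).foldl (fun sv m => sv.set m.toNat false) sv

def pvSieveL (r : Int) : List Bool :=
  (PySem.List.pyRange 2 (r + 1) 1).foldl (fun sv p => pvMarkL r p sv)
    ((PySem.List.pyRange 0 (r + 1) 1).map (fun i => decide (2 ≤ i)))

lemma pvMark_toList (r p : Int) (sv : Array Bool) :
    (pvMark r p sv).toList = pvMarkL r p sv.toList := by
  rw [pvMark, pvMarkL]
  generalize PySem.List.pyRange (p*p) (r+1) p = l
  induction l generalizing sv with
  | nil => rfl
  | cons m l ihl =>
    simp only [List.foldl_cons]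
    rw [ihl, Array.toList_setIfInBounds]

lemma pvSieve_toList (r : Int) : (pvSieve r).toList = pvSieveL r := by
  rw [pvSieve, pvSieveL]
  generalize hsv : ((PySem.List.pyRange 0 (r+1) 1).map (fun i => decide (2 ≤ i))) = sv0
  have h0 : ((sv0.toArray) : Array Bool).toList = sv0 := by simp
  generalize PySem.List.pyRange 2 (r+1) 1 = l
  clear hsv
  induction l generalizing sv0 with
  | nil => simp
  | cons p l ihl =>
    simp only [List.foldl_cons]
    have : pvMark r p sv0.toArray = ((pvMarkL r p sv0).toArray : Array Bool) := by
      apply Array.toList_inj.mp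
      rw [pvMark_toList, h0]
    rw [this]
    exact ihl _ (by simp)

lemma pvArrayGetD_toList (a : Array Bool) (i : Nat) (d : Bool) :
    a.getD i d = a.toList.getD i d := by
  rw [Array.getD, List.getD_eq_getElem?_getD]
  split
  · rename_i h
    rw [List.getElem?_eq_getElem (by simpa using h)]
    simp
  · rename_i h
    rw [List.getElem?_eq_none (by simpa using h)]
    rfl

lemma pvMark_length (r p : Int) (sv : List Bool) : (pvMarkL r p sv).length = sv.length := by
  rw [pvMarkL]
  generalize PySem.List.pyRange (p*p) (r+1) p = l
  induction l generalizing sv with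
  | nil => rfl
  | cons m l ihl => simp only [List.foldl_cons]; rw [ihl]; exact List.length_set ..

-- what one pass 'for m in range(p*p, r+1, p)' does to flag k
lemma pvMark_getD (r p : Int) (sv : List Bool) (hp : 2 ≤ p)
    (hlen : sv.length = (r + 1).toNat) (k : Nat) (hk : (k : Int) ≤ r) :
    (pvMarkL r p sv).getD k false
      = (sv.getD k false && !decide (p * p ≤ (k : Int) ∧ p ∣ (k : Int))) := by
  rw [pvMarkL, pvFoldlSet_getD]
  · congr 2
    rw [decide_eq_decide]
    constructor
    · rintro ⟨m, hm, hmk⟩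
      rw [PySem.List.mem_pyRange_iff_of_pos (by omega)] at hm
      obtain ⟨h1, h2, h3⟩ := hm
      have hm0 : 0 ≤ m := le_trans (by positivity) h1
      have hmk' : m = (k : Int) := by omega
      subst hmk'
      refine ⟨h1, ?_⟩
      have hd : p ∣ (↑k - p * p) + p * p := Dvd.dvd.add h3 (dvd_mul_left p p)
      simpa using hd
    · rintro ⟨h1, h2⟩
      refine ⟨(k : Int), ?_, by omega⟩
      rw [PySem.List.mem_pyRange_iff_of_pos (by omega)]
      refine ⟨h1, by omega, ?_⟩
      have hd : p ∣ (↑k - p * p) := dvd_sub h2 (dvd_mul_left p p)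
      exact hd
  · intro m hm
    rw [PySem.List.mem_pyRange_iff_of_pos (by omega)] at hm
    rw [hlen]; omega

-- the sieve loop invariant: after processing p = 2 .. a-1, flag k says 'k ≥ 2 with no
-- divisor among 2 .. a-1 whose square is ≤ k'
lemma pvSieveFold (r : Int) : ∀ (a : Int) (sv : List Bool), 2 ≤ a →
    sv.length = (r + 1).toNat →
    (∀ k : Nat, (k : Int) ≤ r → sv.getD k false
        = decide (2 ≤ k ∧ ¬ ∃ p < k + 1, 2 ≤ p ∧ (p : Int) < a ∧ p * p ≤ k ∧ p ∣ k)) →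
    ∀ k : Nat, (k : Int) ≤ r →
    ((PySem.List.pyRange a (r + 1) 1).foldl (fun sv p => pvMarkL r p sv) sv).getD k false
      = decide (2 ≤ k ∧ ¬ ∃ p < k + 1, 2 ≤ p ∧ p * p ≤ k ∧ p ∣ k) := by
  intro a
  induction hm : (r + 1 - a).toNat using Nat.strong_induction_on generalizing a with
  | _ fuel ih =>
  intro sv ha hlen hinv k hk
  by_cases hend : r + 1 ≤ a
  · rw [PySem.List.pyRange_one_eq_nil hend, List.foldl_nil, hinv k hk, decide_eq_decide]
    constructor
    · rintro ⟨h2, hno⟩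
      refine ⟨h2, fun ⟨p, hplt, hp2, hpk, hpd⟩ => hno ⟨p, hplt, hp2, ?_, hpk, hpd⟩⟩
      have : p ≤ k := le_trans (Nat.le_mul_of_pos_left p (by omega)) hpk
      have : (p : Int) ≤ (k : Int) := by exact_mod_cast this
      omega
    · rintro ⟨h2, hno⟩
      exact ⟨h2, fun ⟨p, hplt, hp2, _, hpk, hpd⟩ => hno ⟨p, hplt, hp2, hpk, hpd⟩⟩
  · rw [PySem.List.pyRange_one_cons (by omega), List.foldl_cons]
    refine ih (r + 1 - (a+1)).toNat (by omega) (a+1) rfl _ (by omega)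
      (by rw [pvMark_length]; exact hlen) ?_ k hk
    intro k' hk'
    rw [pvMark_getD r a sv ha hlen k' hk', hinv k' hk']
    rw [← decide_not, ← Bool.decide_and, decide_eq_decide]
    constructor
    · rintro ⟨⟨h2, hno⟩, hnota⟩
      refine ⟨h2, fun ⟨p, hplt, hp2, hpa, hpk, hpd⟩ => ?_⟩
      by_cases hpa' : (p : Int) < a
      · exact hno ⟨p, hplt, hp2, hpa', hpk, hpd⟩
      · have hpeq : (p : Int) = a := by omega
        apply hnota
        constructor
        · have : ((p * p : Nat) : Int) ≤ (k' : Int) := by exact_mod_cast hpk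
          push_cast at this; rw [hpeq] at this; exact this
        · have : ((p : Nat) : Int) ∣ ((k' : Nat) : Int) := by exact_mod_cast hpd
          rwa [hpeq] at this
    · rintro ⟨h2, hno⟩
      refine ⟨⟨h2, fun ⟨p, hplt, hp2, hpa, hpk, hpd⟩ => hno ⟨p, hplt, hp2, by omega, hpk, hpd⟩⟩, ?_⟩
      rintro ⟨hak, had⟩
      apply hno
      have haa : a ≤ a * a := le_mul_of_one_le_left (by omega) (by omega)
      refine ⟨a.toNat, by omega, by omega, by omega, ?_, ?_⟩
      · have : ((a.toNat : Nat) : Int) * (a.toNat : Int) ≤ (k' : Int) := by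
          rw [Int.toNat_of_nonneg (by omega)]; exact hak
        exact_mod_cast this
      · apply pvNatDvdOfIntDvd k' a (by omega) had

-- final sieve flags: flag k (0 ≤ k ≤ r) is exactly 'k has no small divisor'
lemma pvSieve_getD (r : Int) (k : Nat) (hk : (k : Int) ≤ r) :
    (pvSieveL r).getD k false
      = decide (2 ≤ k ∧ ¬ ∃ p < k + 1, 2 ≤ p ∧ p * p ≤ k ∧ p ∣ k) := by
  rw [pvSieveL]
  apply pvSieveFold r 2 _ (by omega) _ _ k hk
  · rw [List.length_map, PySem.List.length_pyRange_one]; simp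
  · intro k' hk'
    have h1 : ((PySem.List.pyRange 0 (r+1) 1).map (fun i => decide (2 ≤ i))).getD k' false
        = PySem.List.pyGetD ((PySem.List.pyRange 0 (r+1) 1).map (fun i => decide (2 ≤ i))) ((k' : Nat) : Int) false := by
      rw [PySem.List.pyGetD_natCast]
    rw [h1, PySem.List.pyGetD_map_pyRange_of_nonneg _ _ _ _ (by omega) (by omega)]
    rw [decide_eq_decide]
    constructor
    · intro h2
      exact ⟨by exact_mod_cast h2, fun ⟨p, _, _, hpa, _, _⟩ => by omega⟩
    · rintro ⟨h2, _⟩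
      exact_mod_cast h2

-- 'no divisor p ≥ 2 with p² ≤ k' is primality
lemma pvNoSmallFactor_iff (k : Nat) :
    (2 ≤ k ∧ ¬ ∃ p < k + 1, 2 ≤ p ∧ p * p ≤ k ∧ p ∣ k) ↔ k.Prime := by
  constructor
  · rintro ⟨h2, hno⟩
    by_contra hnp
    refine hno ⟨k.minFac, ?_, (Nat.minFac_prime (by omega)).two_le, ?_, Nat.minFac_dvd k⟩
    · have h1 := Nat.minFac_sq_le_self (n := k) (by omega) hnp
      have h2f := (Nat.minFac_prime (show k ≠ 1 by omega)).two_le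
      nlinarith [h1]
    · have h1 := Nat.minFac_sq_le_self (n := k) (by omega) hnp
      nlinarith [h1]
  · intro hp
    refine ⟨hp.two_le, fun ⟨p, hplt, hp2, hpk, hpd⟩ => ?_⟩
    rcases (hp.eq_one_or_self_of_dvd p hpd) with h | h
    · omega
    · subst h; nlinarith [hp.two_le]

-- membership in the computed prime table
lemma pvPrimes_mem (r q : Int) :
    q ∈ pvPrimes r (pvSieve r) ↔ 2 ≤ q ∧ q ≤ r ∧ q.toNat.Prime := by
  rw [pvPrimes, List.mem_filter, PySem.List.mem_pyRange_one]
  constructor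
  · rintro ⟨⟨h2, hub⟩, hflag⟩
    refine ⟨h2, by omega, ?_⟩
    rw [pvArrayGetD_toList, pvSieve_toList, pvSieve_getD r q.toNat (by omega)] at hflag
    rw [← pvNoSmallFactor_iff]
    exact of_decide_eq_true hflag
  · rintro ⟨h2, hub, hp⟩
    refine ⟨⟨h2, by omega⟩, ?_⟩
    rw [pvArrayGetD_toList, pvSieve_toList, pvSieve_getD r q.toNat (by omega)]
    exact decide_eq_true ((pvNoSmallFactor_iff _).mpr hp)

lemma pvPrimes_sorted (r : Int) (sv : Array Bool) :
    (pvPrimes r sv).Pairwise (· ≤ ·) := by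
  rw [pvPrimes]
  exact ((PySem.List.pairwise_lt_pyRange_one 2 (r+1)).filter _).imp le_of_lt

-- the break-at-p²>c loop, on an ascending list of divisor candidates ≥ 2
lemma pvCheckLoop_iff (c : Int) (l : List Int) (hs : l.Pairwise (· ≤ ·))
    (h2 : ∀ p ∈ l, 2 ≤ p) :
    pvCheckLoop c l = true ↔ ∀ p ∈ l, p * p ≤ c → ¬ p ∣ c := by
  induction l with
  | nil => simp [pvCheckLoop]
  | cons p ps ih =>
    rw [pvCheckLoop]
    by_cases hbrk : p * p > c
    · rw [if_pos hbrk]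
      simp only [true_iff]
      intro q hq hqc
      exfalso
      rcases List.mem_cons.mp hq with h | h
      · rw [h] at hqc; omega
      · have hpq : p ≤ q := (List.pairwise_cons.mp hs).1 q h
        have : p * p ≤ q * q := mul_le_mul hpq hpq (by have := h2 p List.mem_cons_self; omega)
          (by have := h2 q (List.mem_cons_of_mem _ h); omega)
        omega
    · rw [if_neg hbrk]
      by_cases hdvd : PySem.Int.mod c p = 0
      · rw [if_pos (by simp [hdvd])]
        rw [PySem.Int.mod_eq_zero_iff_dvd] at hdvd
        simp only [Bool.false_eq_true, false_iff]
        intro hall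
        exact hall p List.mem_cons_self (by omega) hdvd
      · rw [if_neg (by simp [hdvd])]
        rw [ih (List.pairwise_cons.mp hs).2 (fun q hq => h2 q (List.mem_cons_of_mem _ hq))]
        constructor
        · intro hall q hq hqc
          rcases List.mem_cons.mp hq with h | h
          · subst h; rw [← PySem.Int.mod_eq_zero_iff_dvd]; exact hdvd
          · exact hall q h hqc
        · intro hall q hq hqc
          exact hall q (List.mem_cons_of_mem _ hq) hqc

-- B's table-based test agrees with A's trial division on 0 ≤ c ≤ limit < (r+1)²
lemma pvIsPrimeWith_eq_A (c r limit : Int) (hc : 0 ≤ c) (hcl : c ≤ limit)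
    (hr : 1 ≤ r) (hlim : limit < (r + 1) * (r + 1)) :
    pvIsPrimeWith c (pvPrimes r (pvSieve r)) = pvIsPrimeA c := by
  have hcast : ((c.toNat : Nat) : Int) = c := Int.toNat_of_nonneg hc
  have hA : pvIsPrimeA c = true ↔ c.toNat.Prime := by rw [← hcast]; exact pvPrimeA_iff c.toNat
  have hB : pvIsPrimeWith c (pvPrimes r (pvSieve r)) = true ↔ c.toNat.Prime := by
    rw [pvIsPrimeWith]
    by_cases hc2 : c < 2
    · rw [if_pos hc2]
      have : c.toNat < 2 := by omega
      simp only [Bool.false_eq_true, false_iff]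
      intro hp; have := hp.two_le; omega
    · rw [if_neg hc2]
      rw [pvCheckLoop_iff c _ (pvPrimes_sorted r _) (fun p hp => ((pvPrimes_mem r p).mp hp).1)]
      constructor
      · intro hall
        by_contra hnp
        have hmf := Nat.minFac_prime (n := c.toNat) (by omega)
        have hsq := Nat.minFac_sq_le_self (n := c.toNat) (by omega) hnp
        set q : Nat := c.toNat.minFac with hqdef
        have hq2 : 2 ≤ q := hmf.two_le
        have hqq : (q : Int) * q ≤ c := by
          have : ((q * q : Nat) : Int) ≤ ((c.toNat : Nat) : Int) := by
            exact_mod_cast (by nlinarith [hsq] : q * q ≤ c.toNat)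
          rw [hcast] at this; push_cast at this; exact this
        have hqr : (q : Int) ≤ r := by
          by_contra hgt
          push Not at hgt
          have h1 : r + 1 ≤ (q : Int) := by omega
          have h2 : (r + 1) * (r + 1) ≤ (q : Int) * (q : Int) :=
            mul_le_mul h1 h1 (by omega) (by positivity)
          omega
        have hqmem : (q : Int) ∈ pvPrimes r (pvSieve r) := by
          rw [pvPrimes_mem]
          refine ⟨by exact_mod_cast hq2, hqr, by simpa using hmf⟩
        apply hall (q : Int) hqmem hqq
        have : (q : Nat) ∣ c.toNat := Nat.minFac_dvd _
        have : ((q : Nat) : Int) ∣ ((c.toNat : Nat) : Int) := by exact_mod_cast this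
        rwa [hcast] at this
      · intro hp p hpmem hpc hpd
        obtain ⟨hp2, hpr, hpprime⟩ := (pvPrimes_mem r p).mp hpmem
        have hpn : p.toNat ∣ c.toNat := by
          apply pvNatDvdOfIntDvd c.toNat p (by omega)
          rwa [hcast]
        rcases hp.eq_one_or_self_of_dvd _ hpn with h | h
        · have := hpprime.two_le; omega
        · have hpe : p = c := by omega
          subst hpe
          nlinarith [hpc, hp2]
  cases h1 : pvIsPrimeA c <;> cases h2 : pvIsPrimeWith c (pvPrimes r (pvSieve r)) <;> simp_all

-- ---- both scans are find? over the same candidate list ----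
lemma pvFind?_congr {α : Type} (l : List α) (p q : α → Bool) (h : ∀ x ∈ l, p x = q x) :
    l.find? p = l.find? q := by
  induction l with
  | nil => rfl
  | cons x xs ih =>
    simp only [List.find?]
    rw [← h x List.mem_cons_self]
    cases p x
    · exact ih (fun y hy => h y (List.mem_cons_of_mem _ hy))
    · rfl

lemma pvScanB_eq_find? (pr : List Int) (l : List Int) :
    pvScanB pr l = l.find? (fun c => pvIsPrimeWith c pr) := by
  induction l with
  | nil => rfl
  | cons c cs ih =>
    rw [pvScanB, List.find?]
    cases h : pvIsPrimeWith c pr <;> simp [ih]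

lemma pvInnerA_eq_find? (s : List Char) (i : Int) (js : List Int) :
    pvInnerA s i js = (js.map (pvCandA s i)).find? pvIsPrimeA := by
  induction js with
  | nil => rfl
  | cons j js ih =>
    rw [pvInnerA, List.map_cons, List.find?]
    cases h : pvIsPrimeA (pvCandA s i j) <;> simp [ih]

lemma pvOuterA_eq_find? (s : List Char) (l : List Int) :
    pvOuterA s l
      = (l.flatMap fun i => (PySem.List.pyRange 0 10 1).map (pvCandA s i)).find? pvIsPrimeA := by
  induction l with
  | nil => rfl
  | cons i is ih =>
    rw [pvOuterA, List.flatMap_cons, List.find?_append, pvInnerA_eq_find?, ih]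
    cases ((PySem.List.pyRange 0 10 1).map (pvCandA s i)).find? pvIsPrimeA <;> rfl

-- A's range(10) of int digits and B's "0123456789" characters build the same candidates
lemma pvCandLists_eq (s : List Char) (i : Int) :
    ['0','1','2','3','4','5','6','7','8','9'].map (pvCandB s i)
      = (PySem.List.pyRange 0 10 1).map (pvCandA s i) := by
  have hr : PySem.List.pyRange 0 10 1 = [0,1,2,3,4,5,6,7,8,9] := by decide
  rw [hr]
  simp only [List.map_cons, List.map_nil, pvCandA, pvCandB]
  rfl

-- every candidate int(s[:i]+d+s[i+1:]) built from str(n), n ≥ 0, is nonnegative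
lemma pvCandsB_nonneg (n : Int) (hn : 0 ≤ n) :
    ∀ x ∈ pvCandsB (PySem.Int.toChars n), 0 ≤ x := by
  intro x hx
  rw [pvCandsB, List.mem_flatMap] at hx
  obtain ⟨i, _, hx⟩ := hx
  rw [List.mem_map] at hx
  obtain ⟨d, hd, hx⟩ := hx
  subst hx
  apply pvOfCharsNonneg
  intro c hc
  rcases List.mem_append.mp hc with hc | hc
  · rcases List.mem_append.mp hc with hc | hc
    · exact pvToCharsNeDash n hn c (PySem.List.mem_of_mem_slice _ _ _ hc)
    · rw [List.mem_singleton] at hc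
      subst hc
      fin_cases hd <;> decide
  · exact pvToCharsNeDash n hn c (PySem.List.mem_of_mem_slice _ _ _ hc)

theorem smallest_prime_replacement_spec : Claim_equal_smallest_prime_replacement := by
  intro n _ hpre
  unfold Spec_smallest_prime_replacement
  have hn : (0:Int) ≤ n := hpre
  obtain ⟨limit, hlim⟩ : ∃ m, PySem.List.max? (n :: pvCandsB (PySem.Int.toChars n)) (fun x => x) = some m := by
    cases h : PySem.List.max? (n :: pvCandsB (PySem.Int.toChars n)) (fun x => x) with
    | none => exact absurd ((PySem.List.max?_eq_none_iff _ _).mp h) (by simp)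
    | some m => exact ⟨m, rfl⟩
  have hmax : ∀ y ∈ n :: pvCandsB (PySem.Int.toChars n), y ≤ limit :=
    PySem.List.max?_isMax hlim
  obtain ⟨hr1, hrsq⟩ := pvSqrtLoop_bounds limit 1 (by omega)
  simp only [smallest_prime_replacement, smallest_prime_replacement_alt, hlim, Option.getD_some]
  set r := pvSqrtLoop limit 1 with hrdef
  -- both sides are find? over the same candidate list
  have hlists : pvCandsB (PySem.Int.toChars n)
      = (PySem.List.pyRange 0 ((PySem.Int.toChars n).length : Int) 1).flatMap
          (fun i => (PySem.List.pyRange 0 10 1).map (pvCandA (PySem.Int.toChars n) i)) := by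
    have hf : (fun i => ['0','1','2','3','4','5','6','7','8','9'].map (pvCandB (PySem.Int.toChars n) i))
        = (fun i => (PySem.List.pyRange 0 10 1).map (pvCandA (PySem.Int.toChars n) i)) :=
      funext (fun i => pvCandLists_eq (PySem.Int.toChars n) i)
    rw [pvCandsB, hf]
  have hpred : ∀ x ∈ n :: pvCandsB (PySem.Int.toChars n),
      pvIsPrimeA x = pvIsPrimeWith x (pvPrimes r (pvSieve r)) := by
    intro x hx
    have hx0 : 0 ≤ x := by
      rcases List.mem_cons.mp hx with h | h
      · omega
      · exact pvCandsB_nonneg n hn x h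
    exact (pvIsPrimeWith_eq_A x r limit hx0 (hmax x hx) hr1 hrsq).symm
  rw [pvScanB_eq_find?, pvOuterA_eq_find?, ← hlists]
  rw [← pvFind?_congr _ _ _ hpred]
  rw [List.find?]
  cases h : pvIsPrimeA n <;> simp
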